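-- pv_equiv track=rewrite | github.com/BobbY-24/CS1301-Lab-1 | Practice Problems/practiceProblems.py | creditHours
-- ===== SOURCE A (Python) =====
-- def creditHours(courseCatalog, myCourses):
--     creditS = 0
--
--     for subject_my, course_num_list in myCourses.items():
--
--         for num in course_num_list:
--             for subject, dicts in courseCatalog.items():
--                 for code, credit in dicts.items():
--                     if num == code:
--                         creditS += credit
--     return creditS
-- ===== SOURCE B (Python) =====
-- from collections import Counter
--
-- def creditHours(courseCatalog, myCourses):
--     counts = Counter(num for nums in myCourses.values() for num in nums)
--     return sum(credit * counts[code]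
--                for dicts in courseCatalog.values()
--                for code, credit in dicts.items())
-- ===== Notes on version B (the rewrite author's own statement) =====
-- stated objective: faster
-- what changed: B builds a Counter of all enrolled course numbers in one flattening pass, then computes the total as a single sum of credit * count(code) over the flattened catalog, replacing A's four nested loops that rescan the whole catalog for every enrolled number.
import Mathlib
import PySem

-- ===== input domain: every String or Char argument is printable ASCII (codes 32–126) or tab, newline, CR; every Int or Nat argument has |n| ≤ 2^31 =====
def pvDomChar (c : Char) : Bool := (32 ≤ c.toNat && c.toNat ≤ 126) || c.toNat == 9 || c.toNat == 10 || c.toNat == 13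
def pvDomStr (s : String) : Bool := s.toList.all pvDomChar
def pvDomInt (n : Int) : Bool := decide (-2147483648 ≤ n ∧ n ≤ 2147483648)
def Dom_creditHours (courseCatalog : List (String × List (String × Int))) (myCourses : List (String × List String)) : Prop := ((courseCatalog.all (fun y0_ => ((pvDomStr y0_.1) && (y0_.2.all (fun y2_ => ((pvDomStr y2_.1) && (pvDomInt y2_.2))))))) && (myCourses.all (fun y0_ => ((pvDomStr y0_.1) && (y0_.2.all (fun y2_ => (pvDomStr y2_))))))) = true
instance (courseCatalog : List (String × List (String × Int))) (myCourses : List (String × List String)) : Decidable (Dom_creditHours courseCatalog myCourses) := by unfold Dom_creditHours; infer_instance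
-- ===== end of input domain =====

-- B counts all enrolled numbers once (Counter) and sums credit * count over the flattened
-- catalog in one pass, instead of A's four nested loops rescanning the catalog per number.

-- ===== PORT A =====
def creditHours (courseCatalog : List (String × List (String × Int))) (myCourses : List (String × List String)) : Int :=
  myCourses.foldl (fun creditS p =>
    p.2.foldl (fun creditS num =>
      courseCatalog.foldl (fun creditS q =>
        q.2.foldl (fun creditS cc =>
          if num == cc.1 then creditS + cc.2 else creditS) creditS) creditS) creditS) 0

-- ===== PORT B =====
def creditHours_alt (courseCatalog : List (String × List (String × Int))) (myCourses : List (String × List String)) : Int :=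
  let counts : PySem.Dict String Int := PySem.Dict.counter (myCourses.flatMap (·.2))
  ((courseCatalog.flatMap (·.2)).map (fun cc => cc.2 * counts.getD cc.1 0)).sum

-- ===== PRECONDITION & SPEC =====
def Spec_creditHours (courseCatalog : List (String × List (String × Int))) (myCourses : List (String × List String)) (out : Int) : Prop := out = creditHours_alt courseCatalog myCourses
instance (courseCatalog : List (String × List (String × Int))) (myCourses : List (String × List String)) (out : Int) : Decidable (Spec_creditHours courseCatalog myCourses out) := by unfold Spec_creditHours; infer_instance

-- ===== CLAIM (what is proved, stated in full; the proofs are below) =====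
def Claim_equal_creditHours : Prop := ∀ (courseCatalog : List (String × List (String × Int))) (myCourses : List (String × List String)), Dom_creditHours courseCatalog myCourses → Spec_creditHours courseCatalog myCourses (creditHours courseCatalog myCourses)

-- ===== LEMMAS AND PROOFS =====

-- sum of credits a single number `num` picks up from the whole catalog
def gScan (courseCatalog : List (String × List (String × Int))) (num : String) : Int :=
  ((courseCatalog.flatMap (·.2)).map (fun cc => if num = cc.1 then cc.2 else 0)).sum

theorem sum_map_add {α : Type} (L : List α) (f g : α → Int) :
    (L.map (fun x => f x + g x)).sum = (L.map f).sum + (L.map g).sum := by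
  induction L with
  | nil => simp
  | cons a t ih => simp [ih]; ring

theorem inner_scan (num : String) (P : List (String × Int)) (s : Int) :
    P.foldl (fun s cc => if num == cc.1 then s + cc.2 else s) s
      = s + (P.map (fun cc => if num = cc.1 then cc.2 else 0)).sum := by
  induction P generalizing s with
  | nil => simp
  | cons cc t ih =>
    simp only [List.foldl_cons]
    rw [ih]
    simp only [beq_iff_eq, List.map_cons, List.sum_cons]
    split_ifs <;> ring

theorem cat_fold (num : String) (cat : List (String × List (String × Int))) (s : Int) :
    cat.foldl (fun s q => q.2.foldl (fun s cc => if num == cc.1 then s + cc.2 else s) s) s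
      = s + gScan cat num := by
  induction cat generalizing s with
  | nil => simp [gScan]
  | cons q t ih =>
    simp only [List.foldl_cons]
    rw [ih, inner_scan, gScan, gScan, List.flatMap_cons, List.map_append, List.sum_append]
    ring

theorem A_fold (cat : List (String × List (String × Int))) (L : List (String × List String)) (s : Int) :
    L.foldl (fun s p => p.2.foldl (fun s num =>
        cat.foldl (fun s q => q.2.foldl (fun s cc => if num == cc.1 then s + cc.2 else s) s) s) s) s
      = s + ((L.flatMap (·.2)).map (gScan cat)).sum := by
  induction L generalizing s with
  | nil => simp
  | cons p t ih =>
    simp only [List.foldl_cons, List.flatMap_cons, List.map_append, List.sum_append]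
    rw [ih]
    have h : ∀ (ns : List String) (s : Int),
        ns.foldl (fun s num =>
          cat.foldl (fun s q => q.2.foldl (fun s cc => if num == cc.1 then s + cc.2 else s) s) s) s
        = s + (ns.map (gScan cat)).sum := by
      intro ns
      induction ns with
      | nil => simp
      | cons n nt ih2 =>
        intro s
        simp only [List.foldl_cons, List.map_cons, List.sum_cons]
        rw [cat_fold, ih2]
        ring
    rw [h]
    ring

theorem sum_if_count (L : List String) (c : String) (v : Int) :
    (L.map (fun num => if num = c then v else 0)).sum = v * (L.count c : Int) := by
  induction L with
  | nil => simp
  | cons a t ih =>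
    simp only [List.map_cons, List.sum_cons, List.count_cons, beq_iff_eq]
    rw [ih]
    split_ifs with h <;> simp [h] <;> ring

theorem swap_sums (P : List (String × Int)) (L : List String) :
    (L.map (fun num => (P.map (fun cc => if num = cc.1 then cc.2 else 0)).sum)).sum
      = (P.map (fun cc => cc.2 * (L.count cc.1 : Int))).sum := by
  induction P with
  | nil => simp
  | cons cc t ih =>
    simp only [List.map_cons, List.sum_cons]
    have : (L.map (fun num => (if num = cc.1 then cc.2 else 0)
              + (t.map (fun c2 => if num = c2.1 then c2.2 else 0)).sum)).sum
        = (L.map (fun num => if num = cc.1 then cc.2 else 0)).sum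
          + (L.map (fun num => (t.map (fun c2 => if num = c2.1 then c2.2 else 0)).sum)).sum :=
      sum_map_add L _ _
    rw [this, ih, sum_if_count]

-- ===== VERDICT (by name: the statement is the Claim_ definition above) =====
theorem creditHours_spec : Claim_equal_creditHours := by
  intro cat my _
  unfold Spec_creditHours creditHours creditHours_alt
  rw [A_fold]
  simp only [zero_add, PySem.Dict.getD_counter]
  calc ((my.flatMap (·.2)).map (gScan cat)).sum
      = ((cat.flatMap (·.2)).map (fun cc => cc.2 * ((my.flatMap (·.2)).count cc.1 : Int))).sum := by
        unfold gScan; exact swap_sums _ _
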